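-- pv_equiv track=rewrite | github.com/Albert-learner/Algorithm | Programmers/LEVEL1/ApplyMorePaint.py | solution_other
-- ===== SOURCE A (Python) =====
-- from collections import deque
--
-- def solution_other(n, m, section):
--     answer = 0
--     section = deque(section)
--
--     while section:
--         start_colored = section.popleft()
--         while section:
--             if section[0] >= start_colored + m:
--                 break
--             section.popleft()
--         answer += 1
--     return answer
-- ===== SOURCE B (Python) =====
-- def solution_other(n, m, section):
--     answer = 0
--     painted = None  # right boundary of the last applied roller; None = nothing painted yet
--     for s in section:
--         if painted is None or s >= painted:
--             answer += 1
--             painted = s + m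
--     return answer
-- ===== Notes on version B (the rewrite author's own statement) =====
-- stated objective: simpler
-- what changed: Replaced the deque with nested while/popleft loops by one flat for-loop over the list maintaining a scalar 'painted' boundary (None until the first paint); avoiding the deque construction and per-element popleft gives a constant-factor speedup.
import Mathlib
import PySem

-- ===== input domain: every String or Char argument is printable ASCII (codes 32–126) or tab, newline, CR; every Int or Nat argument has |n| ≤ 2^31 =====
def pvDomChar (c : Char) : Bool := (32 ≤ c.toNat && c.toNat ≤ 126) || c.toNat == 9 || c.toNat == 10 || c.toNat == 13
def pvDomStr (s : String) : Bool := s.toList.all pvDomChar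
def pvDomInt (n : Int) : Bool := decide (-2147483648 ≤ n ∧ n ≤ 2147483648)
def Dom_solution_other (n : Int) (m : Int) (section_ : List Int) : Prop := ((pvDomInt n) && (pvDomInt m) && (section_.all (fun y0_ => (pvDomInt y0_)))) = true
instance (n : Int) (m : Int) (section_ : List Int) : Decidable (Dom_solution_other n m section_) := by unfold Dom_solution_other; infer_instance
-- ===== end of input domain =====

-- B replaces A's deque with nested while/popleft loops by a single flat pass keeping a
-- scalar 'painted' boundary; objective: simpler.

-- ===== PORT A =====
-- inner 'while section: if section[0] >= t: break; section.popleft()' loop (t = start_colored + m)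
def solnInnerDrop (t : Int) : List Int → List Int
  | [] => []
  | h :: tl => if h ≥ t then h :: tl else solnInnerDrop t tl

theorem solnInnerDrop_length_le (t : Int) (l : List Int) : (solnInnerDrop t l).length ≤ l.length := by
  induction l with
  | nil => simp [solnInnerDrop]
  | cons h tl ih =>
    simp only [solnInnerDrop]
    split
    · simp
    · exact Nat.le_succ_of_le ih

-- outer 'while section:' loop
def solnOuter (m : Int) : List Int → Int
  | [] => 0
  | h :: tl => solnOuter m (solnInnerDrop (h + m) tl) + 1
termination_by l => l.length
decreasing_by
  exact Nat.lt_succ_of_le (solnInnerDrop_length_le _ _)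

def solution_other (n : Int) (m : Int) (section_ : List Int) : Int :=
  solnOuter m section_

-- ===== PORT B =====
-- flat for-loop: state = (painted boundary as Option Int, answer)
def solnStep (m : Int) (st : Option Int × Int) (s : Int) : Option Int × Int :=
  match st with
  | (none, a) => (some (s + m), a + 1)
  | (some p, a) => if s ≥ p then (some (s + m), a + 1) else (some p, a)

def solution_other_alt (n : Int) (m : Int) (section_ : List Int) : Int :=
  (section_.foldl (solnStep m) (none, 0)).2

-- ===== PRECONDITION & SPEC =====
def Spec_solution_other (n : Int) (m : Int) (section_ : List Int) (out : Int) : Prop := out = solution_other_alt n m section_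
instance (n : Int) (m : Int) (section_ : List Int) (out : Int) : Decidable (Spec_solution_other n m section_ out) := by unfold Spec_solution_other; infer_instance

-- ===== CLAIM (what is proved, stated in full; the proofs are below) =====
def Claim_equal_solution_other : Prop := ∀ (n : Int) (m : Int) (section_ : List Int), Dom_solution_other n m section_ → Spec_solution_other n m section_ (solution_other n m section_)

-- ===== LEMMAS AND PROOFS =====

-- A's count of the remaining list after dropping everything below threshold p
theorem foldB_some (m : Int) (l : List Int) : ∀ (p a : Int),
    (l.foldl (solnStep m) (some p, a)).2 = a + solnOuter m (solnInnerDrop p l) := by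
  induction l with
  | nil => intro p a; simp [solnOuter, solnInnerDrop]
  | cons h tl ih =>
    intro p a
    by_cases hp : h ≥ p
    · simp only [List.foldl, solnStep, solnInnerDrop, if_pos hp, ih]
      rw [solnOuter]
      omega
    · simp only [List.foldl, solnStep, solnInnerDrop, if_neg hp, ih]

-- ===== VERDICT (by name: the statement is the Claim_ definition above) =====
theorem solution_other_spec : Claim_equal_solution_other := by
  intro n m section_ _
  unfold Spec_solution_other solution_other solution_other_alt
  cases section_ with
  | nil => simp [solnOuter]
  | cons h tl =>
    simp only [List.foldl, solnStep, foldB_some]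
    rw [solnOuter]
    omega
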